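-- pv_equiv track=rewrite | github.com/EnricoCalvanese/Ribo-Seq | get_mAUG_footprints.py | find_mAUG_positions
-- ===== SOURCE A (Python) =====
-- from collections import defaultdict
-- from typing import List, Dict, Tuple
--
-- def find_mAUG_positions(sequences: Dict[str, str]) -> Dict[str, List[Tuple[int, str]]]:
--     """
--     Find all mAUG positions in the filtered transcripts.
--
--     Args:
--         sequences: Dictionary of transcript sequences
--
--     Returns:
--         Dictionary mapping transcript IDs to lists of (position, context) tuples
--     """
--     mAUG_positions = defaultdict(list)
--
--     for transcript_id, seq in sequences.items():
--         # Convert to uppercase for consistent matching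
--         seq = seq.upper()
--
--         # Find all AUG positions
--         for i in range(len(seq)-2):
--             if seq[i:i+3] == 'AUG':
--                 # Get context (10 nt before and after)
--                 start = max(0, i-10)
--                 end = min(len(seq), i+13)
--                 context = seq[start:end]
--
--                 mAUG_positions[transcript_id].append((i, context))
--
--     return mAUG_positions
-- ===== SOURCE B (Python) =====
-- from collections import defaultdict
--
-- def find_mAUG_positions(sequences):
--     """Split-based re-implementation: cut the sequence at 'AUG' with str.split and
--     reconstruct each occurrence's position as a running sum of chunk lengths
--     (valid because 'AUG' cannot overlap itself), instead of testing every index."""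
--     mAUG_positions = defaultdict(list)
--     for transcript_id, raw in sequences.items():
--         seq = raw.upper()
--         n = len(seq)
--         pos = -3
--         for part in seq.split('AUG')[:-1]:
--             pos += len(part) + 3
--             context = seq[max(0, pos - 10):min(n, pos + 13)]
--             mAUG_positions[transcript_id].append((pos, context))
--     return mAUG_positions
-- ===== Notes on version B (the rewrite author's own statement) =====
-- stated objective: alternative
-- what changed: Replaces the per-index slice-and-compare scan with str.split on 'AUG' plus a prefix-sum over chunk lengths that reconstructs each occurrence position (correct since 'AUG' has no self-overlap).
import Mathlib
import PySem

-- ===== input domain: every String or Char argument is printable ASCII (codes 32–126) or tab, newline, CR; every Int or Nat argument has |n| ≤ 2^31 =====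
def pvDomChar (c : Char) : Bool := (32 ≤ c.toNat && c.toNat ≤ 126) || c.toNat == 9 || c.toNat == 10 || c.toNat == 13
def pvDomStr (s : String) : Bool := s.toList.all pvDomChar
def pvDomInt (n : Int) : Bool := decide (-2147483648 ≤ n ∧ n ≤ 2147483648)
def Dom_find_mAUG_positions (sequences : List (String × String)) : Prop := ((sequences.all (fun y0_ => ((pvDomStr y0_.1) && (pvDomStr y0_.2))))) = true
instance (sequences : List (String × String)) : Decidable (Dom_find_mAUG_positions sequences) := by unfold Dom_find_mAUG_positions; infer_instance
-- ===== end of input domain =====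

-- B replaces A's per-index slice-and-compare scan by str.split on 'AUG' plus a prefix sum
-- over chunk lengths that reconstructs each occurrence position ('AUG' has no self-overlap,
-- so the split's non-overlapping cuts are exactly all occurrences); same return value.

-- ===== PORT A =====
-- A: for each transcript, test seq[i:i+3] == 'AUG' at every index i of range(len(seq)-2),
-- appending (i, context) into a defaultdict(list); returns the dict.
def find_mAUG_positions (sequences : List (String × String)) : List (String × List (Int × String)) :=
  (sequences.foldl (fun acc tp =>
      let seq := PySem.Chars.upper tp.2.toList
      (PySem.List.pyRange 0 ((seq.length : Int) - 2) 1).foldl (fun acc i =>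
        if PySem.List.slice seq (some i) (some (i + 3)) = "AUG".toList then
          let start := max 0 (i - 10)
          let stop := min (seq.length : Int) (i + 13)
          acc.modify tp.1 [] (fun l => l ++ [(i, String.mk (PySem.List.slice seq (some start) (some stop)))])
        else acc) acc)
    PySem.Dict.empty).items

-- ===== PORT B =====
-- B: seq.split('AUG')[:-1] (ported as splitOn … |>.dropLast, which is exactly [:-1]),
-- then one pass over the chunks with the running position pos += len(part) + 3.
def find_mAUG_positions_alt (sequences : List (String × String)) : List (String × List (Int × String)) :=
  (sequences.foldl (fun acc tp =>
      let seq := PySem.Chars.upper tp.2.toList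
      ((PySem.Chars.splitOn seq "AUG".toList).dropLast.foldl
        (fun (st : PySem.Dict String (List (Int × String)) × Int) part =>
          let pos := st.2 + (part.length : Int) + 3
          let context := String.mk (PySem.List.slice seq (some (max 0 (pos - 10))) (some (min (seq.length : Int) (pos + 13))))
          (st.1.modify tp.1 [] (fun l => l ++ [(pos, context)]), pos))
        (acc, -3)).1)
    PySem.Dict.empty).items

-- ===== PRECONDITION & SPEC =====
def Spec_find_mAUG_positions (sequences : List (String × String)) (out : List (String × List (Int × String))) : Prop := out = find_mAUG_positions_alt sequences
instance (sequences : List (String × String)) (out : List (String × List (Int × String))) : Decidable (Spec_find_mAUG_positions sequences out) := by unfold Spec_find_mAUG_positions; infer_instance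

-- ===== CLAIM (what is proved, stated in full; the proofs are below) =====
def Claim_equal_find_mAUG_positions : Prop := ∀ (sequences : List (String × String)), Dom_find_mAUG_positions sequences → Spec_find_mAUG_positions sequences (find_mAUG_positions sequences)

-- ===== LEMMAS AND PROOFS =====

-- the common per-hit action (append (i, context) under the transcript's key)
def augStep (seq : List Char) (tid : String) (acc : PySem.Dict String (List (Int × String)))
    (i : Int) : PySem.Dict String (List (Int × String)) :=
  acc.modify tid [] (fun l => l ++ [(i, String.mk (PySem.List.slice seq (some (max 0 (i - 10))) (some (min (seq.length : Int) (i + 13)))))])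

-- B's loop body (definitionally the lambda inside find_mAUG_positions_alt)
def stepB (seq : List Char) (tid : String) (st : PySem.Dict String (List (Int × String)) × Int)
    (part : List Char) : PySem.Dict String (List (Int × String)) × Int :=
  let pos := st.2 + (part.length : Int) + 3
  (st.1.modify tid [] (fun l => l ++ [(pos, String.mk (PySem.List.slice seq (some (max 0 (pos - 10))) (some (min (seq.length : Int) (pos + 13)))))]), pos)

-- the hit indices, smallest first
def augHits (seq : List Char) : List Nat :=
  (List.range (seq.length - 2)).filter (fun i => decide ("AUG".toList <+: seq.drop i))

theorem innerA_eq (seq : List Char) (tid : String) (acc : PySem.Dict String (List (Int × String))) :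
    (PySem.List.pyRange 0 ((seq.length : Int) - 2) 1).foldl (fun acc i =>
        if PySem.List.slice seq (some i) (some (i + 3)) = "AUG".toList then
          augStep seq tid acc i
        else acc) acc
      = (augHits seq).foldl (fun acc (i : Nat) => augStep seq tid acc (i : Int)) acc := by
  rcases Nat.lt_or_ge seq.length 2 with h2 | h2
  · have hr : PySem.List.pyRange 0 ((seq.length : Int) - 2) 1 = [] := by
      rw [List.eq_nil_iff_forall_not_mem]
      intro x hx
      rw [PySem.List.mem_pyRange_one] at hx
      omega
    have hh : augHits seq = [] := by
      unfold augHits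
      rw [show seq.length - 2 = 0 by omega]
      rfl
    rw [hr, hh]
    rfl
  · rw [show ((seq.length : Int) - 2) = ((seq.length - 2 : Nat) : Int) by omega,
      PySem.List.pyRange_zero_natCast, List.foldl_map]
    unfold augHits
    rw [List.foldl_filter]
    apply PySem.List.foldl_congr_mem
    intro a i hi
    have hiff : (PySem.List.slice seq (some (i : Int)) (some ((i : Int) + 3)) = "AUG".toList)
        ↔ ("AUG".toList <+: seq.drop i) := by
      rw [show ((i : Int) + 3) = ((i : Int) + ((3 : Nat) : Int)) by norm_num,
        PySem.List.slice_natCast_add, List.prefix_iff_eq_take,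
        show ("AUG".toList).length = 3 from rfl]
      exact ⟨fun h => h.symm, fun h => h.symm⟩
    split_ifs with ha hb hb <;> first | rfl | simp_all

theorem filter_range_split (m pos q : Nat) (P : Nat → Bool) (hqm : q < m) (hP : P q = true)
    (hpq : pos ≤ q) (hmin : ∀ i, pos ≤ i → i < q → P i = false) :
    (List.range m).filter (fun i => decide (pos ≤ i) && P i)
      = q :: (List.range m).filter (fun i => decide (q + 1 ≤ i) && P i) := by
  have s1 : List.Pairwise (· < ·) ((List.range m).filter (fun i => decide (pos ≤ i) && P i)) :=
    List.pairwise_lt_range.filter _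
  have s2t : List.Pairwise (· < ·) ((List.range m).filter (fun i => decide (q + 1 ≤ i) && P i)) :=
    List.pairwise_lt_range.filter _
  have s2 : List.Pairwise (· < ·)
      (q :: (List.range m).filter (fun i => decide (q + 1 ≤ i) && P i)) := by
    refine List.Pairwise.cons (fun b hb => ?_) s2t
    simp only [List.mem_filter, Bool.and_eq_true, decide_eq_true_eq] at hb
    omega
  have hmem : ∀ a, a ∈ (List.range m).filter (fun i => decide (pos ≤ i) && P i)
      ↔ a ∈ q :: (List.range m).filter (fun i => decide (q + 1 ≤ i) && P i) := by
    intro a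
    simp only [List.mem_filter, List.mem_range, List.mem_cons, Bool.and_eq_true, decide_eq_true_eq]
    constructor
    · rintro ⟨ham, hpa, hPa⟩
      by_cases haq : a = q
      · exact Or.inl haq
      · refine Or.inr ⟨ham, ?_, hPa⟩
        by_contra hcon
        have : a < q := by omega
        rw [hmin a hpa this] at hPa
        exact Bool.false_ne_true hPa
    · rintro (rfl | ⟨ham, hqa, hPa⟩)
      · exact ⟨hqm, hpq, hP⟩
      · exact ⟨ham, by omega, hPa⟩
  have hperm := (List.perm_ext_iff_of_nodup (s1.imp ne_of_lt) (s2.imp ne_of_lt)).mpr hmem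
  exact List.Perm.eq_of_pairwise (fun _ _ _ _ hab hba => le_antisymm hab hba)
    (s1.imp le_of_lt) (s2.imp le_of_lt) hperm

theorem hits_filter_nil (seq : List Char) (pos : Nat) (hpos : pos ≤ seq.length)
    (hfind : PySem.Chars.findFrom seq "AUG".toList (pos : Int) = -1) :
    (augHits seq).filter (fun i => decide (pos ≤ i)) = [] := by
  have hninf : ¬ "AUG".toList <:+: seq.drop pos :=
    (PySem.Chars.findFrom_natCast_eq_neg_one_iff seq _ pos hpos).mp hfind
  rw [List.filter_eq_nil_iff]
  intro a ha hc
  unfold augHits at ha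
  simp only [List.mem_filter, List.mem_range, decide_eq_true_eq] at ha hc
  apply hninf
  have hdrop : seq.drop a = (seq.drop pos).drop (a - pos) := by
    rw [List.drop_drop]
    congr 1
    omega
  rw [hdrop] at ha
  exact ha.2.isInfix.trans (List.drop_suffix _ _).isInfix

-- 'AUG' cannot overlap itself: a hit at q kills hits at q+1 and q+2
theorem no_overlap (seq : List Char) (q : Nat) (hq : "AUG".toList <+: seq.drop q) :
    ¬ "AUG".toList <+: seq.drop (q + 1) ∧ ¬ "AUG".toList <+: seq.drop (q + 2) := by
  obtain ⟨t, ht⟩ := hq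
  have h1 : seq.drop (q + 1) = 'U' :: 'G' :: t := by
    rw [show q + 1 = q + 1 from rfl, ← List.drop_drop (j := q) (i := 1), ← ht]
    rfl
  have h2 : seq.drop (q + 2) = 'G' :: t := by
    rw [← List.drop_drop (j := q) (i := 2), ← ht]
    rfl
  constructor
  · rintro ⟨t', ht'⟩
    rw [h1] at ht'
    simp at ht'
  · rintro ⟨t', ht'⟩
    rw [h2] at ht'
    simp at ht'

-- ---- structure of PySem.Chars.splitOn on separator "AUG" ----

theorem go_nil (fuel : Nat) (cur : List Char) (acc : List (List Char)) :
    PySem.Chars.splitOn.go "AUG".toList fuel [] cur acc = (cur.reverse :: acc).reverse := by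
  cases fuel <;> simp [PySem.Chars.splitOn.go]

theorem go_cons (f : Nat) (c : Char) (rest cur : List Char) (acc : List (List Char)) :
    PySem.Chars.splitOn.go "AUG".toList (f + 1) (c :: rest) cur acc
      = if ("AUG".toList).isPrefixOf (c :: rest) then
          PySem.Chars.splitOn.go "AUG".toList f ((c :: rest).drop 3) [] (cur.reverse :: acc)
        else PySem.Chars.splitOn.go "AUG".toList f rest (c :: cur) acc := by
  simp [PySem.Chars.splitOn.go]

theorem go_fuel_irrel (f1 : Nat) : ∀ (f2 : Nat) (l cur : List Char) (acc : List (List Char)),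
    l.length ≤ f1 → l.length ≤ f2 →
    PySem.Chars.splitOn.go "AUG".toList f1 l cur acc
      = PySem.Chars.splitOn.go "AUG".toList f2 l cur acc := by
  induction f1 with
  | zero =>
    intro f2 l cur acc h1 h2
    have : l = [] := List.eq_nil_of_length_eq_zero (by omega)
    subst this
    rw [go_nil, go_nil]
  | succ f ih =>
    intro f2 l cur acc h1 h2
    cases l with
    | nil => rw [go_nil, go_nil]
    | cons c rest =>
      obtain ⟨f2', rfl⟩ : ∃ f2', f2 = f2' + 1 := ⟨f2 - 1, by simp at h2; omega⟩
      rw [go_cons, go_cons]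
      simp only [List.length_cons] at h1 h2
      split_ifs with h
      · exact ih f2' _ [] _ (by simp; omega) (by simp; omega)
      · exact ih f2' rest (c :: cur) acc (by omega) (by omega)

theorem go_acc (fuel : Nat) : ∀ (l cur : List Char) (acc : List (List Char)),
    l.length ≤ fuel →
    PySem.Chars.splitOn.go "AUG".toList fuel l cur acc
      = acc.reverse ++ PySem.Chars.splitOn.go "AUG".toList fuel l cur [] := by
  induction fuel with
  | zero =>
    intro l cur acc h
    have : l = [] := List.eq_nil_of_length_eq_zero (by omega)
    subst this
    rw [go_nil, go_nil]
    simp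
  | succ f ih =>
    intro l cur acc h
    cases l with
    | nil => rw [go_nil, go_nil]; simp
    | cons c rest =>
      simp only [List.length_cons] at h
      rw [go_cons, go_cons]
      split_ifs with hp
      · rw [ih _ [] (cur.reverse :: acc) (by simp; omega),
          ih _ [] [cur.reverse] (by simp; omega)]
        simp
      · rw [ih rest (c :: cur) acc (by omega), ih rest (c :: cur) [] (by omega)]

theorem go_ne_nil (fuel : Nat) : ∀ (l cur : List Char) (acc : List (List Char)),
    PySem.Chars.splitOn.go "AUG".toList fuel l cur acc ≠ [] := by
  induction fuel with
  | zero =>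
    intro l cur acc
    cases l <;> simp [PySem.Chars.splitOn.go]
  | succ f ih =>
    intro l cur acc
    cases l with
    | nil => rw [go_nil]; simp
    | cons c rest =>
      rw [go_cons]
      split_ifs <;> apply ih

theorem splitOn_ne_nil (l : List Char) : PySem.Chars.splitOn l "AUG".toList ≠ [] :=
  go_ne_nil (l.length + 1) l [] []

theorem go_no_occ (fuel : Nat) : ∀ (l cur : List Char) (acc : List (List Char)),
    l.length ≤ fuel → ¬ "AUG".toList <:+: l →
    PySem.Chars.splitOn.go "AUG".toList fuel l cur acc = acc.reverse ++ [cur.reverse ++ l] := by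
  induction fuel with
  | zero =>
    intro l cur acc h _
    have : l = [] := List.eq_nil_of_length_eq_zero (by omega)
    subst this
    rw [go_nil]
    simp
  | succ f ih =>
    intro l cur acc h hninf
    cases l with
    | nil => rw [go_nil]; simp
    | cons c rest =>
      simp only [List.length_cons] at h
      rw [go_cons]
      rw [if_neg (by
        intro hp
        exact hninf (List.IsPrefix.isInfix (List.isPrefixOf_iff_prefix.mp hp)))]
      rw [ih rest (c :: cur) acc (by omega)
        (fun hin => hninf (hin.trans (List.suffix_cons c rest).isInfix))]
      simp

theorem splitOn_no_occ (l : List Char) (h : ¬ "AUG".toList <:+: l) :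
    PySem.Chars.splitOn l "AUG".toList = [l] := by
  show PySem.Chars.splitOn.go "AUG".toList (l.length + 1) l [] [] = [l]
  rw [go_no_occ (l.length + 1) l [] [] (by omega) h]
  simp

theorem go_first (q : Nat) : ∀ (l cur : List Char) (acc : List (List Char)) (fuel : Nat),
    l.length ≤ fuel → q + 3 ≤ l.length → "AUG".toList <+: l.drop q →
    (∀ j, j < q → ¬ "AUG".toList <+: l.drop j) →
    PySem.Chars.splitOn.go "AUG".toList fuel l cur acc
      = PySem.Chars.splitOn.go "AUG".toList ((l.drop (q + 3)).length + 1) (l.drop (q + 3)) []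
          ((cur.reverse ++ l.take q) :: acc) := by
  induction q with
  | zero =>
    intro l cur acc fuel hf hlen hpre _
    cases l with
    | nil => simp at hlen
    | cons c rest =>
      obtain ⟨f, rfl⟩ : ∃ f, fuel = f + 1 := ⟨fuel - 1, by simp at hf; omega⟩
      rw [go_cons, if_pos (List.isPrefixOf_iff_prefix.mpr (by simpa using hpre))]
      simp only [List.length_cons] at hf hlen
      rw [go_fuel_irrel f ((((c :: rest).drop 3).length) + 1) _ [] _ (by simp; omega) (by simp)]
      simp
  | succ q ih =>
    intro l cur acc fuel hf hlen hpre hmin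
    cases l with
    | nil => simp at hlen
    | cons c rest =>
      obtain ⟨f, rfl⟩ : ∃ f, fuel = f + 1 := ⟨fuel - 1, by simp at hf; omega⟩
      simp only [List.length_cons] at hf hlen
      rw [go_cons, if_neg (by
        intro hp
        exact hmin 0 (by omega) (by simpa using List.isPrefixOf_iff_prefix.mp hp))]
      have hrest : ∀ j, j < q → ¬ "AUG".toList <+: rest.drop j := by
        intro j hj
        have := hmin (j + 1) (by omega)
        simpa using this
      have hpre' : "AUG".toList <+: rest.drop q := by
        simpa using hpre
      rw [ih rest (c :: cur) acc f (by omega) (by omega) hpre' hrest]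
      simp [List.take_succ_cons, List.drop_succ_cons]

theorem splitOn_first (l : List Char) (q : Nat) (hlen : q + 3 ≤ l.length)
    (hpre : "AUG".toList <+: l.drop q) (hmin : ∀ j, j < q → ¬ "AUG".toList <+: l.drop j) :
    PySem.Chars.splitOn l "AUG".toList
      = l.take q :: PySem.Chars.splitOn (l.drop (q + 3)) "AUG".toList := by
  show PySem.Chars.splitOn.go "AUG".toList (l.length + 1) l [] []
    = l.take q :: PySem.Chars.splitOn.go "AUG".toList ((l.drop (q + 3)).length + 1) (l.drop (q + 3)) [] []
  rw [go_first q l [] [] (l.length + 1) (by omega) hlen hpre hmin,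
    go_acc _ _ _ [[].reverse ++ l.take q] (by simp)]
  simp

-- main inner lemma for B: the chunk loop from absolute offset k computes the tail hits
theorem innerB_from (seq : List Char) (tid : String) : ∀ (m k : Nat),
    seq.length - k ≤ m → k ≤ seq.length →
    ∀ acc : PySem.Dict String (List (Int × String)),
    (((PySem.Chars.splitOn (seq.drop k) "AUG".toList).dropLast).foldl (stepB seq tid)
        (acc, (k : Int) - 3)).1
      = ((augHits seq).filter (fun i => decide (k ≤ i))).foldl
          (fun acc (i : Nat) => augStep seq tid acc (i : Int)) acc := by
  intro m
  induction m with
  | zero =>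
    intro k hm hk acc
    have hkl : k = seq.length := by omega
    subst hkl
    rw [List.drop_length]
    rw [show PySem.Chars.splitOn ([] : List Char) "AUG".toList = [[]] from rfl]
    rw [show (augHits seq).filter (fun i => decide (seq.length ≤ i)) = [] by
      rw [List.filter_eq_nil_iff]
      intro a ha hc
      unfold augHits at ha
      simp only [List.mem_filter, List.mem_range, decide_eq_true_eq] at ha hc
      omega]
    rfl
  | succ m ih =>
    intro k hm hk acc
    by_cases hfind : PySem.Chars.findFrom seq "AUG".toList (k : Int) = -1
    · have hninf : ¬ "AUG".toList <:+: seq.drop k :=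
        (PySem.Chars.findFrom_natCast_eq_neg_one_iff seq _ k hk).mp hfind
      rw [splitOn_no_occ _ hninf, hits_filter_nil seq k hk hfind]
      rfl
    · have hspec := PySem.Chars.findFrom_natCast_spec seq "AUG".toList k hk hfind
      have hp0 : (0 : Int) ≤ PySem.Chars.findFrom seq "AUG".toList (k : Int) :=
        le_trans (Int.natCast_nonneg k) hspec.1
      set q := (PySem.Chars.findFrom seq "AUG".toList (k : Int)).toNat with hq
      have h3 : q + 3 ≤ seq.length := by
        have hlen := hspec.2.1.length_le
        rw [List.length_drop, show ("AUG".toList).length = 3 from rfl] at hlen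
        omega
      have hkq : k ≤ q := by
        have := hspec.1
        omega
      have hpreq : "AUG".toList <+: seq.drop q := hspec.2.1
      -- split the first chunk off
      have hsplit : PySem.Chars.splitOn (seq.drop k) "AUG".toList
          = (seq.drop k).take (q - k) :: PySem.Chars.splitOn (seq.drop (q + 3)) "AUG".toList := by
        have := splitOn_first (seq.drop k) (q - k)
          (by rw [List.length_drop]; omega)
          (by rw [List.drop_drop, show k + (q - k) = q by omega]; exact hpreq)
          (fun j hj => by
            rw [List.drop_drop]
            exact hspec.2.2 (k + j) (by omega) (by omega))
        rw [this, List.drop_drop, show k + (q - k + 3) = q + 3 by omega]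
      rw [hsplit, List.dropLast_cons_of_ne_nil (splitOn_ne_nil _), List.foldl_cons]
      have hlenpart : (((seq.drop k).take (q - k)).length : Int) = (q : Int) - (k : Int) := by
        rw [List.length_take, List.length_drop]
        omega
      have hstep : stepB seq tid (acc, (k : Int) - 3) ((seq.drop k).take (q - k))
          = (augStep seq tid acc (q : Int), ((q + 3 : Nat) : Int) - 3) := by
        simp only [stepB, augStep, hlenpart]
        rw [show ((k : Int) - 3 + ((q : Int) - (k : Int)) + 3) = (q : Int) from by ring]
        rw [Prod.mk.injEq]
        refine ⟨rfl, by push_cast; ring⟩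
      rw [hstep, ih (q + 3) (by omega) (by omega)]
      -- now the hits side
      have hP : (fun i => decide ("AUG".toList <+: seq.drop i)) q = true := by
        simpa using hpreq
      have hfilter : (augHits seq).filter (fun i => decide (k ≤ i))
          = q :: (augHits seq).filter (fun i => decide (q + 3 ≤ i)) := by
        unfold augHits
        rw [List.filter_filter, List.filter_filter,
          filter_range_split (seq.length - 2) k q _ (by omega) hP hkq
            (fun i hki hiq => by simpa using hspec.2.2 i hki (by omega)),
          List.filter_congr (fun x hx => ?_)]
        by_cases hx1 : x = q + 1
        · subst hx1
          simp
          exact (no_overlap seq q hpreq).1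
        · by_cases hx2 : x = q + 2
          · subst hx2
            simp
            exact (no_overlap seq q hpreq).2
          · by_cases hle : q + 1 ≤ x
            · have : q + 3 ≤ x := by omega
              simp [hle, this]
            · have : ¬ q + 3 ≤ x := by omega
              simp [hle, this]
      rw [hfilter, List.foldl_cons]

-- specialisation of innerB_from to the whole sequence (k = 0)
theorem innerB_eq (seq : List Char) (tid : String) (acc : PySem.Dict String (List (Int × String))) :
    (((PySem.Chars.splitOn seq "AUG".toList).dropLast).foldl (stepB seq tid) (acc, -3)).1
      = (augHits seq).foldl (fun acc (i : Nat) => augStep seq tid acc (i : Int)) acc := by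
  have hB := innerB_from seq tid seq.length 0 (by omega) (by omega) acc
  rw [List.drop_zero] at hB
  norm_num at hB
  exact hB

-- ===== VERDICT (by name: the statement is the Claim_ definition above) =====
theorem find_mAUG_positions_spec : Claim_equal_find_mAUG_positions := by
  intro sequences _
  unfold Spec_find_mAUG_positions find_mAUG_positions find_mAUG_positions_alt
  congr 1
  apply PySem.List.foldl_congr_mem
  intro acc tp _
  simp only
  refine Eq.trans ?_ (innerB_eq (PySem.Chars.upper tp.2.toList) tp.1 acc).symm
  simpa [augStep] using innerA_eq (PySem.Chars.upper tp.2.toList) tp.1 acc
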